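-- pv_equiv track=rewrite | github.com/m0mt/Algorithm-practice | python/programmers/lv2/68645.py | solution
-- ===== SOURCE A (Python) =====
-- def solution(n):
--     answer = [[0 for _ in range(i)] for i in range(1, n + 1)]
--     all = 0
--     for i in range(n):
--         all += i + 1
--     idx = 0
--     floor = 0
--     flag = True # 방향
--     i = 1
--     while i < all + 1:
--         answer[floor][idx] = i
--         if flag :
--             if floor != n - 1 : #맨 아랫줄이 아닐때 층수 하강
--                 floor += 1
--             else : #맨 아랫줄일 때
--                 if 0 not in answer[n - 1] : # 층수 상승
--                     flag = False
--                     n = n - 1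
--                     idx -= 1
--                     floor -= 1
--                 else :
--                     idx += 1
--         else :
--             if 0 not in answer[floor] :
--                 flag = True
--                 floor += 1
--             else :
--                 floor -= 1
--                 idx -= 1
--         i += 1
--     answer = sum(answer, [])
--     return answer
-- ===== SOURCE B (Python) =====
-- def solution(n):
--     pos = []
--     top, bottom, left = 0, n - 1, 0
--     while top <= bottom:
--         for r in range(top, bottom + 1):
--             pos.append((r, left))
--         for c in range(left + 1, bottom - left + 1):
--             pos.append((bottom, c))
--         for r in range(bottom - 1, top, -1):
--             pos.append((r, r - left))
--         top += 2; bottom -= 1; left += 1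
--     rows = [[0] * i for i in range(1, n + 1)]
--     for v, (r, c) in enumerate(pos, 1):
--         rows[r][c] = v
--     return [x for row in rows for x in row]
-- ===== Notes on version B (the rewrite author's own statement) =====
-- stated objective: faster
-- what changed: A simulates the spiral cell-by-cell with a direction flag, rescanning the current row for zeros ('0 not in answer[row]') at every step; B walks the spiral directly with tracked bounds (top, bottom, left), emitting whole down/bottom/diagonal segments without any scanning.
import Mathlib
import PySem

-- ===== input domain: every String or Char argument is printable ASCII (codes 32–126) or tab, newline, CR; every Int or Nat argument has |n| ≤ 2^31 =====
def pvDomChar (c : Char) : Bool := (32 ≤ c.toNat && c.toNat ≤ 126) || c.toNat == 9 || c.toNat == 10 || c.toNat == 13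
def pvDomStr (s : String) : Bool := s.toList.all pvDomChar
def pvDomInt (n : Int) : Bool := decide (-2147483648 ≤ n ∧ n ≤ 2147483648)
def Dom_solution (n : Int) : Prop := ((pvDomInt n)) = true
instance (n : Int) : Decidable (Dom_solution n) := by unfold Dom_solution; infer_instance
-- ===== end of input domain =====

-- B replaces A's O(n^3) flag-and-scan spiral (which rescans rows for zeros at every step)
-- by a direct O(n^2) bounds-tracked spiral; measured faster at large n.

-- shared primitive: Python `M[r][c] = v` (exact wherever the indices are in range;
-- both programs only ever write in range, which the equivalence proof establishes)
def writeM (M : List (List Int)) (r c v : Int) : List (List Int) :=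
  PySem.List.pySetD M r (PySem.List.pySetD (PySem.List.pyGetD M r []) c v)

-- ===== PORT A =====
-- while-loop of A; fuel = number of iterations (i goes 1,2,… so the loop runs `all` times)
def solutionLoopA (fuel : Nat) (answer : List (List Int)) (idx floor : Int)
    (flag : Bool) (n i : Int) : List (List Int) :=
  match fuel with
  | 0 => answer
  | Nat.succ f =>
    let a' := writeM answer floor idx i
    if flag then
      if floor ≠ n - 1 then
        solutionLoopA f a' idx (floor + 1) flag n (i + 1)
      else
        if (0 : Int) ∉ PySem.List.pyGetD a' (n - 1) [] then
          solutionLoopA f a' (idx - 1) (floor - 1) false (n - 1) (i + 1)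
        else
          solutionLoopA f a' (idx + 1) floor flag n (i + 1)
    else
      if (0 : Int) ∉ PySem.List.pyGetD a' floor [] then
        solutionLoopA f a' idx (floor + 1) true n (i + 1)
      else
        solutionLoopA f a' (idx - 1) (floor - 1) flag n (i + 1)

def solution (n : Int) : List Int :=
  let answer := (PySem.List.pyRange 1 (n + 1) 1).map
    (fun i => (PySem.List.pyRange 0 i 1).map (fun _ => (0 : Int)))
  let all := (PySem.List.pyRange 0 n 1).foldl (fun acc i => acc + (i + 1)) 0
  let answer := solutionLoopA all.toNat answer 0 0 true n 1
  answer.foldl (· ++ ·) []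

-- ===== PORT B =====
-- while-loop of B: direct spiral over tracked bounds (top, bottom, left)
def posLoopB (top bottom left : Int) (pos : List (Int × Int)) : List (Int × Int) :=
  if top ≤ bottom then
    let pos := pos ++ (PySem.List.pyRange top (bottom + 1) 1).map (fun r => (r, left))
    let pos := pos ++ (PySem.List.pyRange (left + 1) (bottom - left + 1) 1).map (fun c => (bottom, c))
    let pos := pos ++ (PySem.List.pyRange (bottom - 1) top (-1)).map (fun r => (r, r - left))
    posLoopB (top + 2) (bottom - 1) (left + 1) pos
  else pos
termination_by (bottom + 1 - top).toNat
decreasing_by omega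

def solution_alt (n : Int) : List Int :=
  let pos := posLoopB 0 (n - 1) 0 []
  let rows := (PySem.List.pyRange 1 (n + 1) 1).map
    (fun i => (PySem.List.pyRange 0 i 1).map (fun _ => (0 : Int)))
  let rows := (PySem.List.enumerate pos 1).foldl
    (fun M kv => writeM M kv.2.1 kv.2.2 kv.1) rows
  rows.flatMap id

-- ===== PRECONDITION & SPEC =====
def Spec_solution (n : Int) (out : List Int) : Prop := out = solution_alt n
instance (n : Int) (out : List Int) : Decidable (Spec_solution n out) := by unfold Spec_solution; infer_instance

-- ===== CLAIM (what is proved, stated in full; the proofs are below) =====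
def Claim_equal_solution : Prop := ∀ (n : Int), Dom_solution n → Spec_solution n (solution n)


-- ===== LEMMAS AND PROOFS =====

-- row r of a matrix (Nat index; [] out of range, matching getD's total reading)
def rowAt (M : List (List Int)) (r : Nat) : List Int := M.getD r []

-- apply consecutive writes (r,c) with values i, i+1, …
def applyW (M : List (List Int)) (ps : List (Int × Int)) (i : Int) : List (List Int) :=
  match ps with
  | [] => M
  | p :: ps => applyW (writeM M p.1 p.2 i) ps (i + 1)

-- a row consisting of a nonzero entries, then z zeros, then b nonzero entries
def RowOK (a z b : Nat) (row : List Int) : Prop :=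
  ∃ L R, row = L ++ List.replicate z 0 ++ R ∧ L.length = a ∧ R.length = b ∧
    (∀ x ∈ L, x ≠ 0) ∧ (∀ x ∈ R, x ≠ 0)

def FullRow (r : Nat) (row : List Int) : Prop := row.length = r + 1 ∧ ∀ x ∈ row, x ≠ 0

-- matrix state before shell s of the spiral on an N-triangle
def SInv (N s : Nat) (M : List (List Int)) : Prop :=
  M.length = N ∧ ∀ r, r < N →
    (2*s ≤ r ∧ r + s + 1 ≤ N → RowOK s (r+1-2*s) s (rowAt M r)) ∧
    (¬(2*s ≤ r ∧ r + s + 1 ≤ N) → FullRow r (rowAt M r))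

def downSeg (t k s : Nat) : List (Int × Int) := (List.range k).map fun j => (((t+j : Nat) : Int), ((s : Nat) : Int))
def botSeg (b a k : Nat) : List (Int × Int) := (List.range k).map fun j => (((b : Nat) : Int), ((a+j : Nat) : Int))
def diagSeg (s k : Nat) : List (Int × Int) := (List.range k).map fun j => (((2*s+k-j : Nat) : Int), ((s+k-j : Nat) : Int))

def tri : Nat → Nat
  | 0 => 0
  | m+1 => tri m + (m+1)

def zeroMat (N : Nat) : List (List Int) := (List.range N).map (fun r => List.replicate (r+1) (0:Int))

-- ---- basic write/row lemmas ----
lemma writeM_natCast (M : List (List Int)) (r c : Nat) (v : Int) :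
    writeM M (r:Int) (c:Int) v = M.set r ((M.getD r []).set c v) := by
  simp [writeM]

lemma length_writeM (M : List (List Int)) (r c v : Int) : (writeM M r c v).length = M.length := by
  simp [writeM]

lemma rowAt_writeM_self (M : List (List Int)) (r c : Nat) (v : Int) (h : r < M.length) :
    rowAt (writeM M (r:Int) (c:Int) v) r = (rowAt M r).set c v := by
  rw [writeM_natCast]
  simp [rowAt, List.getD_eq_getElem?_getD, List.getElem?_set_self (by simpa using h),
    List.getElem?_eq_getElem h]

lemma rowAt_writeM_ne (M : List (List Int)) (r c : Nat) (v : Int) (r' : Nat) (h : r' ≠ r) :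
    rowAt (writeM M (r:Int) (c:Int) v) r' = rowAt M r' := by
  rw [writeM_natCast]
  simp [rowAt, List.getD_eq_getElem?_getD, List.getElem?_set_ne (by omega : r ≠ r')]

lemma applyW_append (ps qs : List (Int × Int)) : ∀ (M : List (List Int)) (i : Int),
    applyW M (ps ++ qs) i = applyW (applyW M ps i) qs (i + ps.length) := by
  induction ps with
  | nil => intro M i; simp [applyW]
  | cons p ps ih => intro M i; simp [applyW, ih, add_assoc]; ring_nf

lemma applyW_length (ps : List (Int × Int)) : ∀ (M : List (List Int)) (i : Int),
    (applyW M ps i).length = M.length := by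
  induction ps with
  | nil => intro M i; simp [applyW]
  | cons p ps ih => intro M i; simp [applyW, ih, length_writeM]

lemma enumerate_foldl (pos : List (Int × Int)) : ∀ (M : List (List Int)) (i : Int),
    (PySem.List.enumerate pos i).foldl (fun M kv => writeM M kv.2.1 kv.2.2 kv.1) M = applyW M pos i := by
  induction pos with
  | nil => intro M i; simp [applyW, PySem.List.enumerate_nil]
  | cons p ps ih => intro M i; simp [applyW, PySem.List.enumerate_cons, ih]

-- ---- RowOK lemmas ----
lemma RowOK.len {a z b : Nat} {row : List Int} (h : RowOK a z b row) : row.length = a + z + b := by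
  obtain ⟨L, R, hrow, hL, hR, _, _⟩ := h
  simp [hrow, hL, hR]; omega

lemma RowOK.mem_zero {a z b : Nat} {row : List Int} (h : RowOK a z b row) :
    ((0:Int) ∈ row ↔ z ≠ 0) := by
  obtain ⟨L, R, hrow, hL, hR, hLn, hRn⟩ := h
  subst hrow
  simp only [List.mem_append, List.mem_replicate, and_true]
  constructor
  · rintro ((h0 | hz) | h0)
    · exact absurd rfl (hLn 0 h0)
    · exact hz
    · exact absurd rfl (hRn 0 h0)
  · intro hz; left; right; exact hz

lemma RowOK.set_first {a z b : Nat} {row : List Int} (h : RowOK a (z+1) b row) {v : Int} (hv : v ≠ 0) :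
    RowOK (a+1) z b (row.set a v) := by
  obtain ⟨L, R, hrow, hL, hR, hLn, hRn⟩ := h
  subst hrow
  refine ⟨L ++ [v], R, ?_, by simp [hL], hR, ?_, hRn⟩
  · rw [List.append_assoc, List.set_append_right _ _ (by omega),
      List.replicate_succ]
    simp [hL]
  · intro x hx
    rcases List.mem_append.1 hx with h1 | h1
    · exact hLn x h1
    · simp at h1; subst h1; exact hv

lemma RowOK.set_last {a z b : Nat} {row : List Int} (h : RowOK a (z+1) b row) {v : Int} (hv : v ≠ 0) :
    RowOK a z (b+1) (row.set (a+z) v) := by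
  obtain ⟨L, R, hrow, hL, hR, hLn, hRn⟩ := h
  subst hrow
  refine ⟨L, v :: R, ?_, hL, by simp [hR], hLn, ?_⟩
  · rw [List.append_assoc, List.set_append_right _ _ (by omega),
      List.replicate_succ', List.append_assoc,
      List.set_append_right _ _ (by simp; omega)]
    simp [hL]
  · intro x hx
    rcases List.mem_cons.1 hx with h1 | h1
    · subst h1; exact hv
    · exact hRn x h1

lemma RowOK.full {a b r : Nat} {row : List Int} (h : RowOK a 0 b row) (hab : a + b = r + 1) :
    FullRow r row := by
  obtain ⟨L, R, hrow, hL, hR, hLn, hRn⟩ := h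
  subst hrow
  constructor
  · simp [hL, hR]; omega
  · intro x hx
    simp at hx
    rcases hx with h1 | h1
    · exact hLn x h1
    · exact hRn x h1

-- ---- segment structure lemmas ----
lemma downSeg_cons (t k s : Nat) : downSeg t (k+1) s = ((t:Int), (s:Int)) :: downSeg (t+1) k s := by
  simp only [downSeg, List.range_succ_eq_map, List.map_cons, List.map_map]
  congr 1
  apply List.map_congr_left
  intro j hj
  simp [Function.comp, Nat.succ_eq_add_one]
  omega

lemma downSeg_snoc (t k s : Nat) : downSeg t (k+1) s = downSeg t k s ++ [(((t+k : Nat):Int), (s:Int))] := by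
  simp [downSeg, List.range_succ]

lemma botSeg_cons (b a k : Nat) : botSeg b a (k+1) = ((b:Int), (a:Int)) :: botSeg b (a+1) k := by
  simp only [botSeg, List.range_succ_eq_map, List.map_cons, List.map_map]
  congr 1
  apply List.map_congr_left
  intro j hj
  simp [Function.comp, Nat.succ_eq_add_one]
  omega

lemma diagSeg_cons (s k : Nat) : diagSeg s (k+1) = (((2*s+k+1 : Nat):Int), ((s+k+1 : Nat):Int)) :: diagSeg s k := by
  simp only [diagSeg, List.range_succ_eq_map, List.map_cons, List.map_map]
  congr 1
  all_goals simp
  all_goals (intro a ha; refine ⟨by omega, by omega⟩)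

lemma downSeg_length (t k s : Nat) : (downSeg t k s).length = k := by simp [downSeg]
lemma botSeg_length (b a k : Nat) : (botSeg b a k).length = k := by simp [botSeg]
lemma diagSeg_length (s k : Nat) : (diagSeg s k).length = k := by simp [diagSeg]

-- ---- effect of each segment on rows ----
lemma down_rows_ne (k : Nat) : ∀ (M : List (List Int)) (t s : Nat) (i : Int) (r : Nat),
    (r < t ∨ t + k ≤ r) → rowAt (applyW M (downSeg t k s) i) r = rowAt M r := by
  induction k with
  | zero => intro M t s i r _; simp [downSeg, applyW]
  | succ k ih =>
    intro M t s i r hr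
    rw [downSeg_cons]
    show rowAt (applyW (writeM M (t:Int) (s:Int) i) (downSeg (t+1) k s) (i+1)) r = rowAt M r
    rw [ih _ _ _ _ _ (by omega), rowAt_writeM_ne _ _ _ _ _ (by omega)]

lemma down_rows_set (k : Nat) : ∀ (M : List (List Int)) (t s : Nat) (i : Int) (j : Nat),
    j < k → t + j < M.length →
    rowAt (applyW M (downSeg t k s) i) (t+j) = (rowAt M (t+j)).set s (i + j) := by
  induction k with
  | zero => intro M t s i j hj; omega
  | succ k ih =>
    intro M t s i j hj hlen
    rw [downSeg_cons]
    show rowAt (applyW (writeM M (t:Int) (s:Int) i) (downSeg (t+1) k s) (i+1)) (t+j)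
        = (rowAt M (t+j)).set s (i + j)
    rcases Nat.eq_zero_or_pos j with hj0 | hj0
    · subst hj0
      rw [down_rows_ne _ _ _ _ _ _ (by omega)]
      simpa using rowAt_writeM_self M t s i (by simpa using hlen)
    · have hidx : t + j = (t+1) + (j-1) := by omega
      rw [hidx, ih _ _ _ _ _ (by omega) (by rw [length_writeM]; omega)]
      rw [rowAt_writeM_ne _ _ _ _ _ (by omega)]
      congr 1
      omega

lemma bot_rows_ne (z : Nat) : ∀ (M : List (List Int)) (bN a : Nat) (i : Int) (r : Nat),
    r ≠ bN → rowAt (applyW M (botSeg bN a z) i) r = rowAt M r := by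
  induction z with
  | zero => intro M bN a i r _; simp [botSeg, applyW]
  | succ z ih =>
    intro M bN a i r hr
    rw [botSeg_cons]
    show rowAt (applyW (writeM M (bN:Int) (a:Int) i) (botSeg bN (a+1) z) (i+1)) r = rowAt M r
    rw [ih _ _ _ _ _ hr, rowAt_writeM_ne _ _ _ _ _ hr]

lemma bot_rows_self (z : Nat) : ∀ (M : List (List Int)) (bN a b0 : Nat) (i : Int),
    0 < i → bN < M.length → RowOK a z b0 (rowAt M bN) →
    RowOK (a+z) 0 b0 (rowAt (applyW M (botSeg bN a z) i) bN) := by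
  induction z with
  | zero => intro M bN a b0 i _ _ h; simpa [botSeg, applyW] using h
  | succ z ih =>
    intro M bN a b0 i hi hlen h
    rw [botSeg_cons]
    show RowOK (a+(z+1)) 0 b0
      (rowAt (applyW (writeM M (bN:Int) (a:Int) i) (botSeg bN (a+1) z) (i+1)) bN)
    have : a + (z+1) = (a+1) + z := by omega
    rw [this]
    apply ih _ _ _ _ _ (by omega) (by rw [length_writeM]; omega)
    rw [rowAt_writeM_self _ _ _ _ hlen]
    exact h.set_first (by omega)

lemma diag_rows_ne (k : Nat) : ∀ (M : List (List Int)) (s : Nat) (i : Int) (r : Nat),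
    (r < 2*s+1 ∨ 2*s+k < r) → rowAt (applyW M (diagSeg s k) i) r = rowAt M r := by
  induction k with
  | zero => intro M s i r _; simp [diagSeg, applyW]
  | succ k ih =>
    intro M s i r hr
    rw [diagSeg_cons]
    show rowAt (applyW (writeM M ((2*s+k+1 : Nat):Int) ((s+k+1 : Nat):Int) i) (diagSeg s k) (i+1)) r
        = rowAt M r
    rw [ih _ _ _ _ (by omega), rowAt_writeM_ne _ _ _ _ _ (by omega)]

lemma diag_rows_self (k : Nat) : ∀ (M : List (List Int)) (s : Nat) (i : Int) (r : Nat),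
    0 < i → 2*s+1 ≤ r → r ≤ 2*s+k → r < M.length → RowOK (s+1) (r-2*s) s (rowAt M r) →
    RowOK (s+1) (r-2*s-1) (s+1) (rowAt (applyW M (diagSeg s k) i) r) := by
  induction k with
  | zero => intro M s i r _ _ _; omega
  | succ k ih =>
    intro M s i r hi hlo hhi hlen h
    rw [diagSeg_cons]
    show RowOK (s+1) (r-2*s-1) (s+1)
      (rowAt (applyW (writeM M ((2*s+k+1 : Nat):Int) ((s+k+1 : Nat):Int) i) (diagSeg s k) (i+1)) r)
    rcases Nat.lt_or_ge r (2*s+k+1) with hc | hc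
    · exact ih _ _ _ _ (by omega) hlo (by omega) (by rw [length_writeM]; omega)
        (by rw [rowAt_writeM_ne _ _ _ _ _ (by omega)]; exact h)
    · have hr : r = 2*s+k+1 := by omega
      subst hr
      rw [diag_rows_ne _ _ _ _ _ (by omega)]
      rw [rowAt_writeM_self _ _ _ _ hlen]
      have hz : 2*s+k+1-2*s = k+1 := by omega
      rw [hz] at h
      have := h.set_last (v := i) (by omega)
      have hpos : (s+1) + k = s+k+1 := by omega
      rw [hpos] at this
      have hz2 : 2*s+k+1-2*s-1 = k := by omega
      rw [hz2]
      exact this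

-- ---- one-step unfoldings of A's loop ----
lemma stepA_down {M : List (List Int)} {idx floor n i : Int} {f : Nat} (h : floor ≠ n - 1) :
    solutionLoopA (f+1) M idx floor true n i
      = solutionLoopA f (writeM M floor idx i) idx (floor+1) true n (i+1) := by
  simp [solutionLoopA, h]

lemma stepA_corner_full {M : List (List Int)} {idx floor n i : Int} {f : Nat}
    (h1 : floor = n - 1) (h2 : (0:Int) ∉ PySem.List.pyGetD (writeM M floor idx i) (n-1) []) :
    solutionLoopA (f+1) M idx floor true n i
      = solutionLoopA f (writeM M floor idx i) (idx-1) (floor-1) false (n-1) (i+1) := by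
  subst h1; simp [solutionLoopA, h2]

lemma stepA_corner_more {M : List (List Int)} {idx floor n i : Int} {f : Nat}
    (h1 : floor = n - 1) (h2 : (0:Int) ∈ PySem.List.pyGetD (writeM M floor idx i) (n-1) []) :
    solutionLoopA (f+1) M idx floor true n i
      = solutionLoopA f (writeM M floor idx i) (idx+1) floor true n (i+1) := by
  subst h1; simp [solutionLoopA, h2]

lemma stepA_up_full {M : List (List Int)} {idx floor n i : Int} {f : Nat}
    (h2 : (0:Int) ∉ PySem.List.pyGetD (writeM M floor idx i) floor []) :
    solutionLoopA (f+1) M idx floor false n i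
      = solutionLoopA f (writeM M floor idx i) idx (floor+1) true n (i+1) := by
  simp [solutionLoopA, h2]

lemma stepA_up_more {M : List (List Int)} {idx floor n i : Int} {f : Nat}
    (h2 : (0:Int) ∈ PySem.List.pyGetD (writeM M floor idx i) floor []) :
    solutionLoopA (f+1) M idx floor false n i
      = solutionLoopA f (writeM M floor idx i) (idx-1) (floor-1) false n (i+1) := by
  simp [solutionLoopA, h2]

-- ---- the three phases of one shell, on A's loop ----
lemma phase_down (k : Nat) : ∀ (f : Nat) (M : List (List Int)) (t s : Nat) (nn i : Int),
    (∀ j, j < k → t + j < M.length ∧ s < (rowAt M (t+j)).length) →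
    ((t:Int) + k ≤ nn - 1) →
    solutionLoopA (k + f) M (s:Int) (t:Int) true nn i
      = solutionLoopA f (applyW M (downSeg t k s) i) (s:Int) ((t:Int) + k) true nn (i + k) := by
  induction k with
  | zero =>
    intro f M t s nn i _ _
    simp [downSeg, applyW]
  | succ k ih =>
    intro f M t s nn i hshape hb
    have hfuel : k+1+f = (k+f)+1 := by omega
    rw [hfuel, stepA_down (by push_cast at hb ⊢; omega), downSeg_cons]
    have e1 : ((t:Int)+1) = ((t+1 : Nat):Int) := by push_cast; ring
    rw [e1]
    have ihh := ih f (writeM M (t:Int) (s:Int) i) (t+1) s nn (i+1) ?_ (by push_cast at hb ⊢; omega)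
    · rw [ihh]
      show solutionLoopA f (applyW (writeM M (t:Int) (s:Int) i) (downSeg (t+1) k s) (i+1))
            (s:Int) (((t+1:Nat):Int)+(k:Int)) true nn ((i+1)+(k:Int))
        = solutionLoopA f (applyW (writeM M (t:Int) (s:Int) i) (downSeg (t+1) k s) (i+1))
            (s:Int) ((t:Int)+((k+1:Nat):Int)) true nn (i+((k+1:Nat):Int))
      congr 1 <;> push_cast <;> ring
    · intro j hj
      have h1 := hshape (j+1) (by omega)
      refine ⟨by rw [length_writeM]; omega, ?_⟩
      rw [rowAt_writeM_ne _ _ _ _ _ (by omega)]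
      have e : t+1+j = t+(j+1) := by omega
      rw [e]
      exact h1.2

lemma phase_bottom (z : Nat) : ∀ (f : Nat) (M : List (List Int)) (a bN b0 : Nat) (nn i : Int),
    1 ≤ z → 0 < i → bN < M.length → nn = (bN:Int) + 1 →
    RowOK a z b0 (rowAt M bN) →
    solutionLoopA (z + f) M (a:Int) (bN:Int) true nn i
      = solutionLoopA f (applyW M (botSeg bN a z) i) ((a:Int) + z - 2) ((bN:Int) - 1) false (nn - 1) (i + z) := by
  induction z with
  | zero => intro f M a bN b0 nn i h1 _ _ _ _; omega
  | succ z ih =>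
    intro f M a bN b0 nn i _ hi hlen hnn h
    have hfuel : z+1+f = (z+f)+1 := by omega
    have hmem : rowAt (writeM M (bN:Int) (a:Int) i) bN = (rowAt M bN).set a i :=
      rowAt_writeM_self M bN a i hlen
    have hset : RowOK (a+1) z b0 ((rowAt M bN).set a i) := h.set_first (by omega)
    have hcast : nn - 1 = ((bN : Nat) : Int) := by omega
    rcases Nat.eq_zero_or_pos z with hz | hz
    · subst hz
      rw [hfuel, stepA_corner_full (by omega) ?_, botSeg_cons]
      · simp only [botSeg, List.range_zero, List.map_nil, applyW, Nat.zero_add]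
        congr 1 <;> push_cast <;> ring
      · rw [hcast, PySem.List.pyGetD_natCast]
        show (0:Int) ∉ rowAt (writeM M (bN:Int) (a:Int) i) bN
        rw [hmem]
        simpa using hset.mem_zero.not.mpr (by simp)
    · rw [hfuel, stepA_corner_more (by omega) ?_, botSeg_cons]
      · have e1 : ((a:Int)+1) = ((a+1 : Nat):Int) := by push_cast; ring
        rw [e1]
        have ihh := ih f (writeM M (bN:Int) (a:Int) i) (a+1) bN b0 nn (i+1) (by omega) (by omega)
          (by rw [length_writeM]; omega) hnn (by rw [hmem]; exact hset)
        rw [ihh]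
        show solutionLoopA f (applyW (writeM M (bN:Int) (a:Int) i) (botSeg bN (a+1) z) (i+1))
              (((a+1:Nat):Int)+(z:Int)-2) ((bN:Int)-1) false (nn-1) ((i+1)+(z:Int))
          = solutionLoopA f (applyW (writeM M (bN:Int) (a:Int) i) (botSeg bN (a+1) z) (i+1))
              ((a:Int)+((z+1:Nat):Int)-2) ((bN:Int)-1) false (nn-1) (i+((z+1:Nat):Int))
        congr 1 <;> push_cast <;> ring
      · rw [hcast, PySem.List.pyGetD_natCast]
        show (0:Int) ∈ rowAt (writeM M (bN:Int) (a:Int) i) bN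
        rw [hmem]
        exact hset.mem_zero.mpr (by omega)

lemma phase_diag (k : Nat) : ∀ (f : Nat) (M : List (List Int)) (s : Nat) (nn i : Int),
    1 ≤ k → 0 < i → 2*s+k < M.length →
    (∀ r, 2*s+1 ≤ r → r ≤ 2*s+k → RowOK (s+1) (r-2*s) s (rowAt M r)) →
    solutionLoopA (k + f) M ((s+k : Nat):Int) ((2*s+k : Nat):Int) false nn i
      = solutionLoopA f (applyW M (diagSeg s k) i) ((s+1 : Nat):Int) ((2*s+2 : Nat):Int) true nn (i + k) := by
  induction k with
  | zero => intro f M s nn i h1 _ _ _; omega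
  | succ k ih =>
    intro f M s nn i _ hi hlen hrows
    have hfuel : k+1+f = (k+f)+1 := by omega
    have hcur := hrows (2*s+k+1) (by omega) (by omega)
    have hz : 2*s+k+1-2*s = k+1 := by omega
    rw [hz] at hcur
    have ew : ((2*s+(k+1) : Nat):Int) = ((2*s+k+1 : Nat):Int) := by push_cast; ring
    have ew2 : ((s+(k+1) : Nat):Int) = ((s+k+1 : Nat):Int) := by push_cast; ring
    have hmem : rowAt (writeM M ((2*s+k+1 : Nat):Int) ((s+k+1 : Nat):Int) i) (2*s+k+1)
        = (rowAt M (2*s+k+1)).set (s+k+1) i := rowAt_writeM_self M _ _ i (by omega)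
    have hset : RowOK (s+1) k (s+1) ((rowAt M (2*s+k+1)).set (s+k+1) i) := by
      have := hcur.set_last (v := i) (by omega)
      have e : (s+1) + k = s+k+1 := by omega
      rwa [e] at this
    rw [ew, ew2, hfuel]
    rcases Nat.eq_zero_or_pos k with hk | hk
    · subst hk
      rw [stepA_up_full ?_, diagSeg_cons]
      · simp only [diagSeg, List.range_zero, List.map_nil, applyW, Nat.zero_add]
        congr 1 <;> push_cast <;> ring
      · rw [PySem.List.pyGetD_natCast]
        show (0:Int) ∉ rowAt (writeM M ((2*s+0+1 : Nat):Int) ((s+0+1 : Nat):Int) i) (2*s+0+1)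
        rw [hmem]
        simpa using hset.mem_zero.not.mpr (by simp)
    · rw [stepA_up_more ?_, diagSeg_cons]
      · have e1 : ((s+k+1 : Nat):Int)-1 = ((s+k : Nat):Int) := by push_cast; ring
        have e2 : ((2*s+k+1 : Nat):Int)-1 = ((2*s+k : Nat):Int) := by push_cast; ring
        rw [e1, e2]
        have ihh := ih f (writeM M ((2*s+k+1 : Nat):Int) ((s+k+1 : Nat):Int) i) s nn (i+1)
          (by omega) (by omega) (by rw [length_writeM]; omega) ?_
        · rw [ihh]
          show solutionLoopA f (applyW (writeM M ((2*s+k+1 : Nat):Int) ((s+k+1 : Nat):Int) i) (diagSeg s k) (i+1))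
                ((s+1 : Nat):Int) ((2*s+2 : Nat):Int) true nn ((i+1)+(k:Int))
            = solutionLoopA f (applyW (writeM M ((2*s+k+1 : Nat):Int) ((s+k+1 : Nat):Int) i) (diagSeg s k) (i+1))
                ((s+1 : Nat):Int) ((2*s+2 : Nat):Int) true nn (i+((k+1:Nat):Int))
          congr 1
          push_cast
          ring
        · intro r hr1 hr2
          rw [rowAt_writeM_ne _ _ _ _ _ (by omega)]
          exact hrows r hr1 (by omega)
      · rw [PySem.List.pyGetD_natCast]
        show (0:Int) ∈ rowAt (writeM M ((2*s+k+1 : Nat):Int) ((s+k+1 : Nat):Int) i) (2*s+k+1)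
        rw [hmem]
        exact hset.mem_zero.mpr (by omega)

-- ---- invariant maintenance across one full shell ----
lemma Inv_step (N s m : Nat) (M : List (List Int)) (i : Int)
    (hm : 3 ≤ m) (hN : N = 3*s + m) (hInv : SInv N s M) (hi : 0 < i) :
    SInv N (s+1)
      (applyW (applyW (applyW M (downSeg (2*s) (m-1) s) i)
        (botSeg (2*s+m-1) s m) (i + ((m:Int)-1)))
        (diagSeg s (m-2)) (i + ((m:Int)-1) + m)) := by
  obtain ⟨hLen, hrows⟩ := hInv
  set M1 := applyW M (downSeg (2*s) (m-1) s) i with hM1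
  set M2 := applyW M1 (botSeg (2*s+m-1) s m) (i + ((m:Int)-1)) with hM2
  have hL1 : M1.length = N := by rw [hM1, applyW_length]; exact hLen
  have hL2 : M2.length = N := by rw [hM2, applyW_length]; exact hL1
  have hM1ne : ∀ r : Nat, (r < 2*s ∨ 2*s+(m-1) ≤ r) → rowAt M1 r = rowAt M r :=
    fun r h => down_rows_ne _ _ _ _ _ _ h
  have hM1set : ∀ r : Nat, 2*s ≤ r → r < 2*s+(m-1) →
      rowAt M1 r = (rowAt M r).set s (i + ((r-2*s : Nat) : Int)) := by
    intro r h1 h2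
    have e : r = 2*s+(r-2*s) := by omega
    rw [e]
    rw [down_rows_set (m-1) M (2*s) s i (r-2*s) (by omega) (by omega)]
    congr 2
    omega
  have hM1ok : ∀ r : Nat, 2*s ≤ r → r < 2*s+(m-1) →
      RowOK (s+1) (r-2*s) s (rowAt M1 r) := by
    intro r h1 h2
    rw [hM1set r h1 h2]
    have hold : RowOK s (r+1-2*s) s (rowAt M r) := (hrows r (by omega)).1 (by omega)
    have e : r+1-2*s = (r-2*s)+1 := by omega
    rw [e] at hold
    refine hold.set_first ?_
    have : (0:Int) ≤ ((r-2*s : Nat) : Int) := by positivity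
    omega
  have hM2ne : ∀ r : Nat, r ≠ 2*s+m-1 → rowAt M2 r = rowAt M1 r :=
    fun r h => bot_rows_ne _ _ _ _ _ _ h
  have hM2b : RowOK (s+m) 0 s (rowAt M2 (2*s+m-1)) := by
    apply bot_rows_self m M1 (2*s+m-1) s s _ (by omega) (by omega)
    rw [hM1ne _ (by omega)]
    have hold : RowOK s (2*s+m-1+1-2*s) s (rowAt M (2*s+m-1)) :=
      (hrows (2*s+m-1) (by omega)).1 (by omega)
    have e : 2*s+m-1+1-2*s = m := by omega
    rwa [e] at hold
  have hM3ne : ∀ r : Nat, (r < 2*s+1 ∨ 2*s+(m-2) < r) →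
      rowAt (applyW M2 (diagSeg s (m-2)) (i + ((m:Int)-1) + m)) r = rowAt M2 r :=
    fun r h => diag_rows_ne _ _ _ _ _ h
  have hM3d : ∀ r : Nat, 2*s+1 ≤ r → r ≤ 2*s+(m-2) →
      RowOK (s+1) (r-2*s-1) (s+1) (rowAt (applyW M2 (diagSeg s (m-2)) (i + ((m:Int)-1) + m)) r) := by
    intro r h1 h2
    refine diag_rows_self (m-2) M2 s _ r (by omega) h1 h2 ?_ ?_
    · omega
    · rw [hM2ne _ (by omega)]
      exact hM1ok r (by omega) (by omega)
  refine ⟨by rw [applyW_length]; exact hL2, ?_⟩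
  intro r hr
  constructor
  · intro hcond
    have h1 : 2*s+1 ≤ r := by omega
    have h2 : r ≤ 2*s+(m-2) := by omega
    have := hM3d r h1 h2
    have e : r-2*s-1 = r+1-2*(s+1) := by omega
    rwa [e] at this
  · intro hcond
    rcases Nat.lt_or_ge r (2*s) with hc | hc
    · rw [hM3ne _ (by omega), hM2ne _ (by omega), hM1ne _ (by omega)]
      exact (hrows r hr).2 (by omega)
    rcases Nat.eq_or_lt_of_le hc with hc2 | hc2
    · rw [hM3ne _ (by omega), hM2ne _ (by omega), hM1set r (by omega) (by omega)]
      have hold : RowOK s (r+1-2*s) s (rowAt M r) := (hrows r hr).1 (by omega)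
      have e : r+1-2*s = 0+1 := by omega
      rw [e] at hold
      have hv : (0:Int) ≤ ((r-2*s : Nat) : Int) := by positivity
      have := hold.set_first (v := i + ((r-2*s : Nat):Int)) (by omega)
      exact this.full (by omega)
    rcases Nat.eq_or_lt_of_le (show 2*s+1 ≤ r by omega) with hc3 | hc3
    · have := hM3d r (by omega) (by omega)
      have e0 : r-2*s-1 = 0 := by omega
      rw [e0] at this
      exact this.full (by omega)
    rcases Nat.lt_or_ge r (2*s+m-1) with hc4 | hc4
    · exact absurd ⟨by omega, by omega⟩ hcond
    rcases Nat.eq_or_lt_of_le hc4 with hc5 | hc5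
    · rw [hM3ne _ (by omega)]
      rw [hc5] at hM2b
      exact hM2b.full (by omega)
    · rw [hM3ne _ (by omega), hM2ne _ (by omega), hM1ne _ (by omega)]
      exact (hrows r hr).2 (by omega)

-- ---- accumulator property of B's position loop ----
lemma posLoopB_acc (k : Nat) : ∀ (t b l : Int) (pos : List (Int × Int)),
    (b + 1 - t).toNat = k → posLoopB t b l pos = pos ++ posLoopB t b l [] := by
  induction k using Nat.strong_induction_on with
  | _ k ih =>
    intro t b l pos hk
    conv_lhs => rw [posLoopB]
    conv_rhs => rw [posLoopB]
    split_ifs with htb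
    · rw [ih ((b-1+1-(t+2)).toNat) (by omega) _ _ _ _ rfl]
      conv_rhs => rw [ih ((b-1+1-(t+2)).toNat) (by omega) _ _ _ _ rfl]
      simp [List.append_assoc]
    · simp

-- ---- pyRange segments of B are the seg lists ----
lemma pyRange_down (t k s : Nat) :
    (PySem.List.pyRange (t:Int) ((t:Int)+(k:Int)) 1).map (fun r => (r, (s:Int))) = downSeg t k s := by
  rw [PySem.List.pyRange_one]
  have e : ((t:Int)+(k:Int)-(t:Int)).toNat = k := by omega
  rw [e]
  simp only [downSeg, List.map_map]
  apply List.map_congr_left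
  intro j hj
  simp only [Function.comp]
  refine Prod.ext ?_ ?_ <;> simp <;> omega

lemma pyRange_bot (b a k : Nat) :
    (PySem.List.pyRange (a:Int) ((a:Int)+(k:Int)) 1).map (fun c => ((b:Int), c)) = botSeg b a k := by
  rw [PySem.List.pyRange_one]
  have e : ((a:Int)+(k:Int)-(a:Int)).toNat = k := by omega
  rw [e]
  simp only [botSeg, List.map_map]
  apply List.map_congr_left
  intro j hj
  simp only [Function.comp]
  refine Prod.ext ?_ ?_ <;> simp <;> omega

lemma pyRange_diag (s k : Nat) :
    (PySem.List.pyRange ((2*s+k : Nat):Int) ((2*s : Nat):Int) (-1)).map (fun r => (r, r - (s:Int))) = diagSeg s k := by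
  rw [PySem.List.pyRange_neg_one]
  have e : (((2*s+k : Nat):Int)-((2*s : Nat):Int)).toNat = k := by omega
  rw [e]
  simp only [diagSeg, List.map_map]
  apply List.map_congr_left
  intro j hj
  simp only [Function.comp]
  simp at hj
  refine Prod.ext ?_ ?_ <;> simp <;> omega

-- A groups the spiral as (down to row above bottom) ++ (bottom from its left corner);
-- B groups it as (down to the bottom corner) ++ (bottom after the corner): same flat list
lemma regroup (t k s z : Nat) :
    downSeg t (k+1) s ++ botSeg (t+k) (s+1) z = downSeg t k s ++ botSeg (t+k) s (z+1) := by
  rw [downSeg_snoc, botSeg_cons]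
  simp [List.append_assoc]

-- one unfolding of B's loop, for a shell of inner size m ≥ 2
lemma posB_unfold (s m : Nat) (hm : 2 ≤ m) :
    posLoopB ((2*s : Nat):Int) (((3*s+m : Nat):Int) - (s:Int) - 1) (s:Int) []
      = downSeg (2*s) m s ++ (botSeg (2*s+m-1) (s+1) (m-1) ++ (diagSeg s (m-2)
        ++ posLoopB (((2*s : Nat):Int)+2) ((((3*s+m : Nat):Int) - (s:Int) - 1) - 1) ((s:Int)+1) [])) := by
  conv_lhs => rw [posLoopB]
  rw [if_pos (by push_cast; omega)]
  rw [posLoopB_acc ((((3*s+m : Nat):Int) - (s:Int) - 1 - 1) + 1 - (((2*s : Nat):Int)+2)).toNat _ _ _ _ rfl]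
  have eB : ((3*s+m : Nat):Int) - (s:Int) - 1 = ((2*s+m-1 : Nat):Int) := by push_cast; omega
  have ed1 : ((2*s+m-1 : Nat):Int) + 1 = ((2*s : Nat):Int) + ((m : Nat):Int) := by push_cast; omega
  have ed2 : ((s : Nat):Int) + 1 = ((s+1 : Nat):Int) := by push_cast; omega
  have ed3 : ((2*s+m-1 : Nat):Int) - ((s : Nat):Int) + 1 = ((s+1 : Nat):Int) + ((m-1 : Nat):Int) := by
    push_cast; omega
  have ed4 : ((2*s+m-1 : Nat):Int) - 1 = ((2*s+(m-2) : Nat):Int) := by push_cast; omega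
  rw [eB, ed1, ed2, ed3, ed4, pyRange_down (2*s) m s, pyRange_diag s (m-2)]
  have hbot := pyRange_bot (2*s+m-1) (s+1) (m-1)
  rw [hbot]
  simp only [List.nil_append, List.append_assoc]

-- ---- the master correspondence: A's loop = B's positions, shell by shell ----
lemma shells (m : Nat) : ∀ (s : Nat) (M : List (List Int)) (i : Int),
    SInv (3*s+m) s M → 0 < i →
    solutionLoopA (tri m) M (s:Int) ((2*s : Nat):Int) true (((3*s+m : Nat):Int) - (s:Int)) i
      = applyW M (posLoopB ((2*s : Nat):Int) (((3*s+m : Nat):Int) - (s:Int) - 1) (s:Int) []) i := by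
  induction m using Nat.strong_induction_on with
  | _ m ih =>
  rcases m with _ | m
  · -- m = 0 : nothing left to do
    intro s M i hInv hi
    rw [posLoopB, if_neg (by push_cast; omega)]
    rfl
  rcases m with _ | m
  · -- m = 1 : a single corner cell
    intro s M i hInv hi
    obtain ⟨hLen, hrows⟩ := hInv
    have hrow : RowOK s 1 s (rowAt M (2*s)) := by
      have h := (hrows (2*s) (by omega)).1 (by omega)
      have e : 2*s+1-2*s = 1 := by omega
      rwa [e] at h
    have hcast : ((3*s+1 : Nat):Int) - (s:Int) - 1 = ((2*s : Nat):Int) := by push_cast; omega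
    have hwrow : rowAt (writeM M ((2*s : Nat):Int) ((s:Nat):Int) i) (2*s)
        = (rowAt M (2*s)).set s i := rowAt_writeM_self M _ _ i (by omega)
    rw [show tri 1 = 0+1 from rfl]
    rw [stepA_corner_full (by push_cast; omega) ?_]
    · -- now both sides are a single write
      conv_rhs => rw [posLoopB]
      rw [if_pos (by push_cast; omega)]
      rw [posLoopB_acc ((((3*s+1 : Nat):Int) - (s:Int) - 1 - 1) + 1 - (((2*s : Nat):Int)+2)).toNat _ _ _ _ rfl]
      rw [hcast]
      have e1 : ((2*s : Nat):Int) + 1 = ((2*s : Nat):Int) + ((1:Nat):Int) := by norm_num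
      have e2 : ((s:Nat):Int) + 1 = ((s:Nat):Int) + ((0:Nat):Int) + 1 := by norm_num
      rw [e1, pyRange_down (2*s) 1 s]
      rw [show ((2*s : Nat):Int) - ((s:Nat):Int) + 1 = (s:Int) + 1 by push_cast; omega]
      rw [PySem.List.pyRange_one_eq_nil (by omega)]
      rw [PySem.List.pyRange_neg_one_eq_nil (by omega)]
      rw [posLoopB, if_neg (by push_cast; omega)]
      simp only [downSeg, List.range_one, List.map_cons, List.map_nil, List.nil_append,
        List.append_nil, applyW]
      rfl
    · rw [show ((3*s+1 : Nat):Int) - (s:Int) - 1 = ((2*s : Nat):Int) by push_cast; omega,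
        PySem.List.pyGetD_natCast]
      show (0:Int) ∉ rowAt (writeM M ((2*s : Nat):Int) ((s:Nat):Int) i) (2*s)
      rw [hwrow]
      have := hrow.set_first (v := i) (by omega)
      simpa using this.mem_zero.not.mpr (by simp)
  rcases m with _ | m
  · -- m = 2 : three cells, no diagonal step
    intro s M i hInv hi
    rw [show (0+1+1 : Nat) = 2 from rfl] at hInv ⊢
    obtain ⟨hLen, hrows⟩ := hInv
    have hrow0 : RowOK s 1 s (rowAt M (2*s)) := by
      have h := (hrows (2*s) (by omega)).1 (by omega)
      have e : 2*s+1-2*s = 1 := by omega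
      rwa [e] at h
    have hrow1 : RowOK s 2 s (rowAt M (2*s+1)) := by
      have h := (hrows (2*s+1) (by omega)).1 (by omega)
      have e : 2*s+1+1-2*s = 2 := by omega
      rwa [e] at h
    set M1 := writeM M ((2*s : Nat):Int) ((s:Nat):Int) i with hM1
    have hL1 : M1.length = 3*s+2 := by rw [hM1, length_writeM]; omega
    have hrow1' : rowAt M1 (2*s+1) = rowAt M (2*s+1) :=
      rowAt_writeM_ne _ _ _ _ _ (by omega)
    set M2 := writeM M1 ((2*s+1 : Nat):Int) ((s:Nat):Int) (i+1) with hM2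
    have hL2 : M2.length = 3*s+2 := by rw [hM2, length_writeM]; omega
    have hw2 : rowAt M2 (2*s+1) = (rowAt M (2*s+1)).set s (i+1) := by
      rw [hM2, rowAt_writeM_self _ _ _ _ (by omega), hrow1']
    have hset2 : RowOK (s+1) 1 s ((rowAt M (2*s+1)).set s (i+1)) := by
      have := hrow1.set_first (v := i+1) (by omega)
      exact this
    set M3 := writeM M2 ((2*s+1 : Nat):Int) ((s+1 : Nat):Int) (i+1+1) with hM3
    have hw3 : rowAt M3 (2*s+1) = ((rowAt M (2*s+1)).set s (i+1)).set (s+1) (i+1+1) := by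
      rw [hM3, rowAt_writeM_self _ _ _ _ (by omega), hw2]
    have hset3 : RowOK (s+1) 0 (s+1) (((rowAt M (2*s+1)).set s (i+1)).set (s+1) (i+1+1)) := by
      have := hset2.set_last (v := i+1+1) (by omega)
      simpa using this
    rw [show tri 2 = (1+1)+1 from rfl]
    rw [stepA_down (by push_cast; omega)]
    rw [show ((2*s : Nat):Int) + 1 = ((2*s+1 : Nat):Int) by push_cast; ring]
    rw [stepA_corner_more (by push_cast; omega) ?_]
    · rw [show ((s:Nat):Int) + 1 = ((s+1 : Nat):Int) by push_cast; ring]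
      rw [stepA_corner_full (by push_cast; omega) ?_]
      · -- both sides are the three writes
        conv_rhs => rw [posLoopB]
        rw [if_pos (by push_cast; omega)]
        rw [posLoopB_acc ((((3*s+2 : Nat):Int) - (s:Int) - 1 - 1) + 1 - (((2*s : Nat):Int)+2)).toNat _ _ _ _ rfl]
        rw [show ((3*s+2 : Nat):Int) - (s:Int) - 1 = ((2*s+1 : Nat):Int) by push_cast; omega]
        rw [show ((2*s+1 : Nat):Int) + 1 = ((2*s : Nat):Int) + ((2:Nat):Int) by push_cast; ring]
        rw [pyRange_down (2*s) 2 s]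
        rw [show ((s:Nat):Int) + 1 = ((s+1 : Nat):Int) by push_cast; ring]
        rw [show ((2*s+1 : Nat):Int) - ((s:Nat):Int) + 1 = ((s+1 : Nat):Int) + ((1:Nat):Int) by push_cast; omega]
        rw [pyRange_bot (2*s+1) (s+1) 1]
        rw [show ((2*s+1 : Nat):Int) - 1 = ((2*s : Nat):Int) by push_cast; omega]
        rw [PySem.List.pyRange_neg_one_eq_nil (by omega)]
        rw [posLoopB, if_neg (by push_cast; omega)]
        simp only [downSeg, botSeg, List.range_one, List.range_succ, List.map_cons, List.map_nil,
          List.map_append, List.nil_append, List.append_nil, List.cons_append, applyW]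
        rfl
      · rw [show ((3*s+2 : Nat):Int) - (s:Int) - 1 = ((2*s+1 : Nat):Int) by push_cast; omega,
          PySem.List.pyGetD_natCast]
        show (0:Int) ∉ rowAt M3 (2*s+1)
        rw [hw3]
        simpa using hset3.mem_zero.not.mpr (by simp)
    · rw [show ((3*s+2 : Nat):Int) - (s:Int) - 1 = ((2*s+1 : Nat):Int) by push_cast; omega,
        PySem.List.pyGetD_natCast]
      show (0:Int) ∈ rowAt M2 (2*s+1)
      rw [hw2]
      exact hset2.mem_zero.mpr (by omega)
  · -- m+3 : a full shell, then recurse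
    intro s M i hInv hi
    rw [show (m+1+1+1 : Nat) = m+3 from rfl] at hInv ⊢
    have hLen := hInv.1
    set nn : Int := ((3*s+(m+3) : Nat):Int) - (s:Int) with hnn
    have hf : tri (m+3) = (m+2) + ((m+3) + ((m+1) + tri m)) := by simp [tri]; omega
    rw [hf]
    -- phase 1: down the left edge
    rw [phase_down (m+2) _ M (2*s) s nn i ?_ (by push_cast; omega)]
    · set M1 := applyW M (downSeg (2*s) (m+2) s) i with hM1def
      rw [show ((2*s : Nat):Int) + ((m+2 : Nat):Int) = ((2*s+m+2 : Nat):Int) by push_cast; ring]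
      -- phase 2: along the bottom row
      rw [phase_bottom (m+3) _ M1 s (2*s+m+2) s nn (i + ((m+2:Nat):Int)) (by omega) (by
          have : (0:Int) ≤ ((m+2:Nat):Int) := by positivity
          omega)
        (by rw [hM1def, applyW_length]; omega) (by push_cast; omega) ?_]
      · set M2 := applyW M1 (botSeg (2*s+m+2) s (m+3)) (i + ((m+2:Nat):Int)) with hM2def
        rw [show ((s:Nat):Int) + ((m+3 : Nat):Int) - 2 = ((s+(m+1) : Nat):Int) by push_cast; ring]
        rw [show ((2*s+m+2 : Nat):Int) - 1 = ((2*s+(m+1) : Nat):Int) by push_cast; ring]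
        -- phase 3: up the diagonal
        rw [phase_diag (m+1) _ M2 s (nn-1) _ (by omega) (by
            have : (0:Int) ≤ ((m+2:Nat):Int) := by positivity
            have : (0:Int) ≤ ((m+3:Nat):Int) := by positivity
            omega)
          (by rw [hM2def, applyW_length, hM1def, applyW_length]; omega) ?_]
        · set M3 := applyW M2 (diagSeg s (m+1)) (i + ((m+2:Nat):Int) + ((m+3:Nat):Int)) with hM3def
          -- the new invariant, and the induction hypothesis
          have hstep := Inv_step (3*s+(m+3)) s (m+3) M i (by omega) (by omega) ⟨hLen, hInv.2⟩ hi
          have hstep' : SInv (3*(s+1)+m) (s+1) M3 := by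
            have e1 : i + (((m+3:Nat):Int) - 1) = i + ((m+2:Nat):Int) := by push_cast; ring
            have e2 : 3*s+(m+3) = 3*(s+1)+m := by omega
            rw [e1, e2, show ((m+3)-1 : Nat) = m+2 from rfl, show ((m+3)-2 : Nat) = m+1 from rfl,
              show (2*s+(m+3)-1 : Nat) = 2*s+m+2 from by omega] at hstep
            exact hstep
          have hrec := ih m (by omega) (s+1) M3
            (i + ((m+2:Nat):Int) + ((m+3:Nat):Int) + ((m+1:Nat):Int)) hstep' (by
              have h1 : (0:Int) ≤ ((m+2:Nat):Int) := by positivity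
              have h2 : (0:Int) ≤ ((m+3:Nat):Int) := by positivity
              have h3 : (0:Int) ≤ ((m+1:Nat):Int) := by positivity
              omega)
          -- unfold B's loop once on the right-hand side
          conv_rhs => rw [hnn, posB_unfold s (m+3) (by omega)]
          rw [show (((2*s : Nat):Int)+2) = ((2*(s+1) : Nat):Int) by push_cast; ring]
          rw [show ((((3*s+(m+3) : Nat):Int) - (s:Int) - 1) - 1)
              = ((3*(s+1)+m : Nat):Int) - ((s+1 : Nat):Int) - 1 by push_cast; omega]
          rw [show ((s:Int)+1) = ((s+1 : Nat):Int) by push_cast; ring]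
          rw [show nn - 1 = ((3*(s+1)+m : Nat):Int) - ((s+1 : Nat):Int) by rw [hnn]; push_cast; omega]
          rw [show ((2*s+2 : Nat):Int) = ((2*(s+1) : Nat):Int) by push_cast; ring]
          rw [hrec]
          -- regroup A's segments into B's
          rw [show (2*s+(m+3)-1 : Nat) = 2*s+(m+2) from by omega, show ((m+3)-1 : Nat) = m+2 from rfl,
            show ((m+3)-2 : Nat) = m+1 from rfl]
          rw [show downSeg (2*s) (m+3) s ++ (botSeg (2*s+(m+2)) (s+1) (m+2) ++ (diagSeg s (m+1)
                ++ posLoopB ((2*(s+1) : Nat):Int) (((3*(s+1)+m : Nat):Int) - ((s+1 : Nat):Int) - 1) ((s+1 : Nat):Int) []))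
              = (downSeg (2*s) (m+2) s ++ botSeg (2*s+(m+2)) s (m+3)) ++ (diagSeg s (m+1)
                ++ posLoopB ((2*(s+1) : Nat):Int) (((3*(s+1)+m : Nat):Int) - ((s+1 : Nat):Int) - 1) ((s+1 : Nat):Int) [])
            from by rw [← List.append_assoc, ← List.append_assoc, regroup]; simp [List.append_assoc]]
          rw [applyW_append, applyW_append, applyW_append]
          rw [hM3def, hM2def, hM1def]
          congr 1 <;> simp [downSeg_length, botSeg_length, diagSeg_length] <;> push_cast <;> ring
        · -- rows for the diagonal phase
          intro r hr1 hr2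
          rw [hM2def, bot_rows_ne _ _ _ _ _ _ (by omega), hM1def]
          have e : r = 2*s+(r-2*s) := by omega
          rw [e, down_rows_set (m+2) M (2*s) s i (r-2*s) (by omega) (by omega), ← e]
          have hold : RowOK s (r+1-2*s) s (rowAt M r) := (hInv.2 r (by omega)).1 (by omega)
          have e2 : r+1-2*s = (r-2*s)+1 := by omega
          rw [e2] at hold
          refine hold.set_first ?_
          have : (0:Int) ≤ ((r-2*s : Nat):Int) := by positivity
          omega
      · -- bottom row is untouched by the down phase
        rw [hM1def, down_rows_ne _ _ _ _ _ _ (by omega)]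
        have hold : RowOK s (2*s+m+2+1-2*s) s (rowAt M (2*s+m+2)) :=
          (hInv.2 (2*s+m+2) (by omega)).1 (by omega)
        have e : 2*s+m+2+1-2*s = m+3 := by omega
        rwa [e] at hold
    · -- shapes for the down phase
      intro j hj
      refine ⟨by omega, ?_⟩
      have hold : RowOK s (2*s+j+1-2*s) s (rowAt M (2*s+j)) :=
        (hInv.2 (2*s+j) (by omega)).1 (by omega)
      rw [hold.len]
      omega

-- ---- top-level plumbing ----
lemma all_eq (N : Nat) :
    ((PySem.List.pyRange 0 (N:Int) 1).foldl (fun acc i => acc + (i + 1)) 0) = (tri N : Int) := by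
  induction N with
  | zero => simp [PySem.List.pyRange_one_eq_nil, tri]
  | succ N ih =>
    have e : ((N+1 : Nat):Int) = (N:Int)+1 := by push_cast; ring
    rw [e, PySem.List.pyRange_one_succ_right (by positivity), List.foldl_append, ih]
    simp [tri]

lemma zeroTri_eq (N : Nat) :
    ((PySem.List.pyRange 1 ((N:Int) + 1) 1).map
      (fun i => (PySem.List.pyRange 0 i 1).map (fun _ => (0 : Int)))) = zeroMat N := by
  rw [PySem.List.pyRange_one]
  have e : ((N:Int)+1-1).toNat = N := by omega
  rw [e]
  simp only [zeroMat, List.map_map]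
  apply List.map_congr_left
  intro r hr
  simp only [Function.comp]
  rw [PySem.List.pyRange_one]
  have e2 : ((1:Int)+(r:Int)-0).toNat = r+1 := by omega
  simp only [sub_zero] at e2 ⊢
  rw [e2]
  simp [Function.comp_def, List.map_const']

lemma Inv_init (N : Nat) : SInv N 0 (zeroMat N) := by
  constructor
  · simp [zeroMat]
  · intro r hr
    constructor
    · intro _
      have hrow : rowAt (zeroMat N) r = List.replicate (r+1) 0 := by
        simp [zeroMat, rowAt, List.getD_eq_getElem?_getD]
        rw [List.getElem?_eq_getElem (by simpa using hr)]
        simp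
      rw [hrow]
      have e : r+1-2*0 = r+1 := by omega
      rw [e]
      exact ⟨[], [], by simp, rfl, rfl, by simp, by simp⟩
    · intro h
      exact absurd ⟨by omega, by omega⟩ h

lemma flatten_eq (M : List (List Int)) : M.foldl (· ++ ·) [] = M.flatMap id := by
  have h : ∀ (L : List (List Int)) (acc : List Int), L.foldl (· ++ ·) acc = acc ++ L.flatten := by
    intro L
    induction L with
    | nil => intro acc; simp
    | cons x xs ih => intro acc; simp [ih, List.append_assoc]
  simp [h, List.flatMap_id]

-- ===== VERDICT (by name: the statement is the Claim_ definition above) =====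
theorem solution_spec : Claim_equal_solution := by
  intro n _
  unfold Spec_solution solution solution_alt
  simp only [enumerate_foldl, flatten_eq]
  rcases (by omega : n ≤ 0 ∨ 0 < n) with hn | hn
  · rw [PySem.List.pyRange_one_eq_nil (by omega : (n:Int) ≤ 0),
      PySem.List.pyRange_one_eq_nil (by omega : n+1 ≤ 1)]
    rw [posLoopB, if_neg (by omega)]
    simp [applyW, solutionLoopA]
  · have hNn : ((n.toNat : Nat):Int) = n := Int.toNat_of_nonneg (by omega)
    rw [← hNn, all_eq n.toNat, zeroTri_eq n.toNat, Int.toNat_natCast]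
    have hsh := shells n.toNat 0 (zeroMat n.toNat) 1 (by simpa using Inv_init n.toNat) one_pos
    norm_num at hsh
    rw [max_eq_left (by omega : (0:Int) ≤ n)] at hsh
    rw [hNn, hsh]
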